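-- pv_equiv track=rewrite | github.com/gcd0318/pe | l3/pe68.py | unilist
-- ===== SOURCE A (Python) =====
-- def unilist(l):
--     res = 0
--     for x in l:
--         if(10 == x):
--             res = res * 100 + x
--         else:
--             res = res*10 + x
--     return res
-- ===== SOURCE B (Python) =====
-- def unilist(l):
--     res = 0
--     place = 1
--     for x in reversed(l):
--         res += x * place
--         place *= 100 if x == 10 else 10
--     return res
-- ===== Notes on version B (the rewrite author's own statement) =====
-- stated objective: alternative
-- what changed: B traverses the list right-to-left maintaining a running place-value multiplier and adds x*place, instead of A's left-to-right shift-and-add accumulator.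
import Mathlib
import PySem

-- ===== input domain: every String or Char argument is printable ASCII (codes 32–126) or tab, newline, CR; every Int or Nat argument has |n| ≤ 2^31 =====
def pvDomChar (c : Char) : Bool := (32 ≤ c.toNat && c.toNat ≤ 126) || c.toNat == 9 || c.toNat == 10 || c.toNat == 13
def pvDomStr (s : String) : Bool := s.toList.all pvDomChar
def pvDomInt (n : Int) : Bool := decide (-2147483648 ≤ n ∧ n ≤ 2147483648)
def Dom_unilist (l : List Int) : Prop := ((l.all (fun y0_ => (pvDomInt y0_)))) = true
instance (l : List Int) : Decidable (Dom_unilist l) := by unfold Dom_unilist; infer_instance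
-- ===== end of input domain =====

-- ===== PORT A =====
def unilist (l : List Int) : Int :=
  l.foldl (fun res x => if 10 == x then res * 100 + x else res * 10 + x) 0

-- ===== PORT B =====
-- B: right-to-left pass keeping (res, place); res += x*place, place *= weight x
def unilist_alt (l : List Int) : Int :=
  (l.reverse.foldl
    (fun (rp : Int × Int) x => (rp.1 + x * rp.2, rp.2 * (if x == 10 then 100 else 10)))
    (0, 1)).1

-- ===== PRECONDITION & SPEC =====
def Spec_unilist (l : List Int) (out : Int) : Prop := out = unilist_alt l
instance (l : List Int) (out : Int) : Decidable (Spec_unilist l out) := by unfold Spec_unilist; infer_instance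

-- ===== CLAIM (what is proved, stated in full; the proofs are below) =====
def Claim_equal_unilist : Prop := ∀ (l : List Int), Dom_unilist l → Spec_unilist l (unilist l)

-- ===== LEMMAS AND PROOFS =====

-- ===== VERDICT (by name: the statement is the Claim_ definition above) =====
theorem foldA_eq (l : List Int) (r : Int) :
    l.foldl (fun res x => if 10 == x then res * 100 + x else res * 10 + x) r
      = r * (l.foldr (fun x (rp : Int × Int) =>
              (rp.1 + x * rp.2, rp.2 * (if x == 10 then 100 else 10))) (0, 1)).2
        + (l.foldr (fun x (rp : Int × Int) =>
              (rp.1 + x * rp.2, rp.2 * (if x == 10 then 100 else 10))) (0, 1)).1 := by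
  induction l generalizing r with
  | nil => simp
  | cons x t ih =>
      simp only [List.foldl_cons, List.foldr_cons, ih]
      by_cases h : x = 10
      · simp [h]; ring
      · simp [h, Ne.symm h]; ring

theorem unilist_spec : Claim_equal_unilist := by
  intro l _
  unfold Spec_unilist unilist unilist_alt
  rw [List.foldl_reverse]
  have := foldA_eq l 0
  simpa using this
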